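-- pv_equiv track=rewrite | github.com/ilanschnell/wasm-ext | wat/loop.py | sum7
-- ===== SOURCE A (Python) =====
-- def sum7(n):
--     if n < 1:
--         return 0
--     res = 0
--     while n:
--         res += n // 7
--         n -= 1
--     return res
-- ===== SOURCE B (Python) =====
-- def sum7(n):
--     if n < 1:
--         return 0
--     q = n // 7
--     r = n % 7
--     return 7 * q * (q - 1) // 2 + q * (r + 1)
-- ===== Notes on version B (the rewrite author's own statement) =====
-- stated objective: faster
-- what changed: replaces the O(n) countdown loop accumulating k//7 with the closed-form formula sum_{k=1}^n floor(k/7) = 7*q*(q-1)/2 + q*(r+1) where q,r = divmod(n,7)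
import Mathlib
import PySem

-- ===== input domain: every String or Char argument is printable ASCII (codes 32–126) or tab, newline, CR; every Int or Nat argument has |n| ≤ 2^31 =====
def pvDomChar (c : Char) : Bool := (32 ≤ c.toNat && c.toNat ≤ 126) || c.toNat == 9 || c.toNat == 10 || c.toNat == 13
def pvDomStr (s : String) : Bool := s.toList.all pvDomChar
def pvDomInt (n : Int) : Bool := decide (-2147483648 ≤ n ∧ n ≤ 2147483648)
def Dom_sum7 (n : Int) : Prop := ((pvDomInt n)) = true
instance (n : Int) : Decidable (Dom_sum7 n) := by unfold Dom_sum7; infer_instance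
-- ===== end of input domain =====

-- B replaces A's O(n) countdown loop by the closed-form formula for sum_{k=1}^n floor(k/7) (faster, asymptotic).

-- ===== PORT A =====
-- loop 'while n: res += n // 7; n -= 1' counting n down from its initial (positive) value to 0
def sum7Go : Nat → Int → Int
  | 0, res => res
  | Nat.succ k, res => sum7Go k (res + PySem.Int.floordiv ((k : Int) + 1) 7)

def sum7 (n : Int) : Int :=
  if n < 1 then 0 else sum7Go n.toNat 0

-- ===== PORT B =====
def sum7_alt (n : Int) : Int :=
  if n < 1 then 0
  else
    let q := PySem.Int.floordiv n 7
    let r := PySem.Int.mod n 7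
    PySem.Int.floordiv (7 * q * (q - 1)) 2 + q * (r + 1)

-- ===== PRECONDITION & SPEC =====
def Spec_sum7 (n : Int) (out : Int) : Prop := out = sum7_alt n
instance (n : Int) (out : Int) : Decidable (Spec_sum7 n out) := by unfold Spec_sum7; infer_instance

-- ===== CLAIM (what is proved, stated in full; the proofs are below) =====
def Claim_equal_sum7 : Prop := ∀ (n : Int), Dom_sum7 n → Spec_sum7 n (sum7 n)

-- ===== LEMMAS AND PROOFS =====

-- the closed form written with Euclidean ediv/emod (equal to Python's // and % here since 2,7 > 0)
def pvH (a : Int) : Int := (7 * (a / 7) * (a / 7 - 1)) / 2 + (a / 7) * (a % 7 + 1)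

theorem pvH_step (a : Int) (_h : 1 ≤ a) : pvH a = pvH (a - 1) + a / 7 := by
  unfold pvH
  by_cases hr : a % 7 = 0
  · have hq : (a - 1) / 7 = a / 7 - 1 := by omega
    have hr' : (a - 1) % 7 = 6 := by omega
    rw [hq, hr', hr]
    obtain ⟨m, hm⟩ := Int.even_mul_succ_self (a / 7 - 1)
    obtain ⟨m', hm'⟩ := Int.even_mul_succ_self (a / 7 - 2)
    have e1 : 7 * (a / 7) * (a / 7 - 1) = 2 * (7 * m) := by linear_combination 7 * hm
    have e2 : 7 * (a / 7 - 1) * (a / 7 - 1 - 1) = 2 * (7 * m') := by linear_combination 7 * hm'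
    rw [e1, e2, Int.mul_ediv_cancel_left _ (by norm_num : (2:Int) ≠ 0),
        Int.mul_ediv_cancel_left _ (by norm_num : (2:Int) ≠ 0)]
    have h2 : 2 * m = 2 * m' + 2 * (a / 7 - 1) := by linear_combination hm' - hm
    omega
  · have hq : (a - 1) / 7 = a / 7 := by omega
    have hr' : (a - 1) % 7 = a % 7 - 1 := by omega
    rw [hq, hr']
    ring

theorem sum7Go_eq (k : Nat) (res : Int) : sum7Go k res = res + pvH (k : Int) := by
  induction k generalizing res with
  | zero => simp [sum7Go]; decide
  | succ k ih =>
    show sum7Go k (res + PySem.Int.floordiv ((k : Int) + 1) 7) = res + pvH ((k + 1 : Nat) : Int)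
    rw [ih, PySem.Int.floordiv_eq_ediv_of_pos (by norm_num)]
    have hc : ((k + 1 : Nat) : Int) = (k : Int) + 1 := by push_cast; ring
    rw [hc, pvH_step ((k : Int) + 1) (by omega)]
    ring_nf

theorem sum7_alt_eq (n : Int) (h : ¬ n < 1) : sum7_alt n = pvH n := by
  unfold sum7_alt pvH
  rw [if_neg h]
  simp only [PySem.Int.floordiv_eq_ediv_of_pos (by norm_num : (0:Int) < 7),
      PySem.Int.mod_eq_emod_of_pos (by norm_num : (0:Int) < 7),
      PySem.Int.floordiv_eq_ediv_of_pos (by norm_num : (0:Int) < 2)]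

-- ===== VERDICT (by name: the statement is the Claim_ definition above) =====
theorem sum7_spec : Claim_equal_sum7 := by
  intro n _
  unfold Spec_sum7
  by_cases h : n < 1
  · simp [sum7, sum7_alt, h]
  · unfold sum7
    rw [if_neg h, sum7Go_eq, Int.toNat_of_nonneg (by omega), sum7_alt_eq n h]
    ring
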